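-- pv_equiv track=rewrite | github.com/mikecon94/advent-of-code-21 | day12/day12.py | visitedSmallCaveTwice
-- ===== SOURCE A (Python) =====
-- def visitedSmallCaveTwice(path):
--     visited = dict()
--     for cave in path:
--         if(cave.islower()):
--             visited[cave] = visited.get(cave, 0) + 1
--             if(visited[cave] > 1):
--                 return True
--     return False
-- ===== SOURCE B (Python) =====
-- def visitedSmallCaveTwice(path):
--     smalls = [cave for cave in path if cave.islower()]
--     return len(smalls) != len(set(smalls))
-- ===== Notes on version B (the rewrite author's own statement) =====
-- stated objective: simpler
-- what changed: Replaced the incremental dict-counting loop with early return by a build-then-compare decomposition: filter the small caves once and compare the list's length with its set's cardinality.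
import Mathlib
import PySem

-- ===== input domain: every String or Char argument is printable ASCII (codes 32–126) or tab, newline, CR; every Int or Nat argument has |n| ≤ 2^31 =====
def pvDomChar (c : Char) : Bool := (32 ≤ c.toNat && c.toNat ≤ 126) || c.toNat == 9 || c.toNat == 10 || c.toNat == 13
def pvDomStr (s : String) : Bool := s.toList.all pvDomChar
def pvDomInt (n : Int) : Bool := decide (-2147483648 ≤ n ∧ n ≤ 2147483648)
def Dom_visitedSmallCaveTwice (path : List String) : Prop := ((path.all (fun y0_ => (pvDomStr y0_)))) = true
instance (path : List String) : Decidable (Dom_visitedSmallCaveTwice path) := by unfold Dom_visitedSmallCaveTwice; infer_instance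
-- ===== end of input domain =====

-- B replaces A's incremental dict-counting loop (early return) with a filter-then-cardinality
-- comparison: simpler decomposition, same exact result.

-- str.islower(), ported by hand (exact on the ASCII domain: cased characters are letters;
-- true iff there is a lowercase letter and no uppercase letter).
def pyStrIslower (s : String) : Bool :=
  s.toList.any PySem.Chars.islower && s.toList.all (fun c => !PySem.Chars.isupper c)

-- ===== PORT A =====
def visitedSmallCaveTwiceGo : List String → PySem.Dict String Int → Bool
  | [], _ => false
  | cave :: rest, visited =>
    if pyStrIslower cave then
      let visited' := visited.insert cave (visited.getD cave 0 + 1)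
      if visited'.getD cave 0 > 1 then true
      else visitedSmallCaveTwiceGo rest visited'
    else visitedSmallCaveTwiceGo rest visited

def visitedSmallCaveTwice (path : List String) : Bool :=
  visitedSmallCaveTwiceGo path PySem.Dict.empty

-- ===== PORT B =====
def visitedSmallCaveTwice_alt (path : List String) : Bool :=
  let smalls := path.filter (fun cave => pyStrIslower cave)
  decide (¬ ((smalls.length : Int) = PySem.Set.len (PySem.Set.ofList smalls)))

-- ===== PRECONDITION & SPEC =====
def Spec_visitedSmallCaveTwice (path : List String) (out : Bool) : Prop := out = visitedSmallCaveTwice_alt path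
instance (path : List String) (out : Bool) : Decidable (Spec_visitedSmallCaveTwice path out) := by unfold Spec_visitedSmallCaveTwice; infer_instance

-- ===== CLAIM (what is proved, stated in full; the proofs are below) =====
def Claim_equal_visitedSmallCaveTwice : Prop := ∀ (path : List String), Dom_visitedSmallCaveTwice path → Spec_visitedSmallCaveTwice path (visitedSmallCaveTwice path)

-- ===== LEMMAS AND PROOFS =====

-- A's loop, for a dict with nonnegative counts, returns true iff some small cave already has a
-- positive count or the small caves of the remaining path contain a duplicate.
theorem visitedSmallCaveTwiceGo_char (l : List String) (d : PySem.Dict String Int)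
    (hd : ∀ k, 0 ≤ d.getD k 0) :
    visitedSmallCaveTwiceGo l d =
      ((l.filter (fun c => pyStrIslower c)).any (fun c => decide (1 ≤ d.getD c 0))
        || !decide ((l.filter (fun c => pyStrIslower c)).Nodup)) := by
  induction l generalizing d with
  | nil => simp [visitedSmallCaveTwiceGo]
  | cons cave rest ih =>
    by_cases hs : pyStrIslower cave
    · simp only [visitedSmallCaveTwiceGo, hs, if_true, List.filter_cons, List.any_cons]
      rw [PySem.Dict.getD_insert, if_pos rfl]
      by_cases hg : 1 ≤ d.getD cave 0
      · have : d.getD cave 0 + 1 > 1 := by omega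
        simp [this, hg]
      · have h0 : d.getD cave 0 = 0 := le_antisymm (by omega) (hd cave)
        have hngt : ¬ (d.getD cave 0 + 1 > 1) := by omega
        rw [if_neg hngt, ih _ ?hpres]
        case hpres =>
          intro k
          by_cases hk : k = cave
          · subst hk; rw [PySem.Dict.getD_insert, if_pos rfl]; omega
          · rw [PySem.Dict.getD_insert, if_neg hk]; exact hd k
        have hget : ∀ c, (d.insert cave (d.getD cave 0 + 1)).getD c 0 =
            if c = cave then 1 else d.getD c 0 := by
          intro c
          rw [PySem.Dict.getD_insert]
          by_cases hc : c = cave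
          · rw [if_pos hc, if_pos hc]; omega
          · rw [if_neg hc, if_neg hc]
        rw [Bool.eq_iff_iff]
        simp only [hg, List.nodup_cons, Bool.or_eq_true, List.any_eq_true, decide_eq_true_eq,
          Bool.not_eq_true', decide_eq_false_iff_not, hget, false_or]
        constructor
        · rintro (⟨c, hc, h1⟩ | hnd)
          · by_cases hcc : c = cave
            · subst hcc; exact Or.inr (by intro ⟨hmem, _⟩; exact hmem hc)
            · rw [if_neg hcc] at h1; exact Or.inl ⟨c, hc, h1⟩
          · exact Or.inr (fun ⟨_, hnd'⟩ => hnd hnd')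
        · rintro (⟨c, hc, h1⟩ | hnd)
          · by_cases hcc : c = cave
            · subst hcc; simp [h0] at h1
            · exact Or.inl ⟨c, hc, by rw [if_neg hcc]; exact h1⟩
          · by_cases hmem : cave ∈ rest.filter (fun c => pyStrIslower c)
            · exact Or.inl ⟨cave, hmem, by simp⟩
            · exact Or.inr (fun hnd' => hnd ⟨hmem, hnd'⟩)
    · simp only [visitedSmallCaveTwiceGo, hs, if_false, List.filter_cons,
        Bool.false_eq_true]
      exact ih d hd

-- set(xs) has the same length as xs exactly when xs has no duplicates.
theorem len_ofList_eq_iff {α : Type} [DecidableEq α] (xs : List α) :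
    (PySem.Set.ofList xs : List α).length = xs.length ↔ xs.Nodup := by
  have hperm : (PySem.Set.ofList xs : List α).Perm xs.dedup := by
    rw [List.perm_ext_iff_of_nodup (PySem.Set.nodup_ofList xs) xs.nodup_dedup]
    intro a
    rw [PySem.Set.mem_ofList, List.mem_dedup]
  rw [hperm.length_eq]
  constructor
  · intro h
    have := List.Sublist.eq_of_length xs.dedup_sublist h
    rw [← List.dedup_eq_self]; exact this
  · intro h
    rw [List.dedup_eq_self.2 h]

-- ===== VERDICT (by name: the statement is the Claim_ definition above) =====
theorem visitedSmallCaveTwice_spec : Claim_equal_visitedSmallCaveTwice := by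
  intro path _
  unfold Spec_visitedSmallCaveTwice visitedSmallCaveTwice visitedSmallCaveTwice_alt
  have hempty : ∀ c : String, (PySem.Dict.empty : PySem.Dict String Int).getD c 0 = 0 := by
    intro c; simp [PySem.Dict.empty, PySem.Dict.getD, PySem.Dict.get?]
  rw [visitedSmallCaveTwiceGo_char _ _ (fun k => le_of_eq (hempty k).symm)]
  set smalls := path.filter (fun c => pyStrIslower c) with hsm
  rw [Bool.eq_iff_iff]
  simp only [hempty, PySem.Set.len, Bool.or_eq_true, List.any_eq_true,
    decide_eq_true_eq, Bool.not_eq_true', decide_eq_false_iff_not, Nat.cast_inj]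
  constructor
  · rintro (⟨c, _, h1⟩ | hnd)
    · exact absurd h1 (by norm_num)
    · exact fun he => hnd ((len_ofList_eq_iff smalls).1 he.symm)
  · intro h
    exact Or.inr fun hnd => h ((len_ofList_eq_iff smalls).2 hnd).symm
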